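-- pv_equiv track=rewrite | github.com/boufoiu/logical_function_silplifier | dockerized_backend/src/ModulesFinaux.py | Arret
-- ===== SOURCE A (Python) =====
-- def contient(impliq, terme):
--     impliq = list(impliq)
--     terme = list(terme)
--
--     fin = False
--     # Cas d'un impliquant groupé -> test: en supprimant toutes les indéterminés '-'
--     while not fin:
--         if "-" in impliq:
--             i = impliq.index("-")
--             impliq.pop(i)
--             terme.pop(i)
--         else:  # Cas d'un impliquant non groupé -> forcément un minterme
--             fin = True
--     if impliq == terme:
--         return True
--     else:
--         return False
--
-- def Arret(f,implq_prmier_ess):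
--     formules_minterme = []
--     formules_minterme = f.copy()
--     for premier in implq_prmier_ess:
--         i = 0
--         while i<len(formules_minterme):
--             if contient(premier,formules_minterme[i]) == True :
--                 formules_minterme.pop(i)
--                 i = 0
--             else:
--                 i += 1
--     return formules_minterme
-- ===== SOURCE B (Python) =====
-- def covers(p, t):
--     # a prime implicant p covers minterm t iff same length and every
--     # determined position of p matches t ('-' is a wildcard)
--     if len(p) != len(t):
--         return False
--     return all(a == '-' or a == b for a, b in zip(p, t))
--
-- def Arret(f, implq_prmier_ess):
--     # single non-mutating pass: keep each minterm not covered by any prime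
--     return [t for t in f if not any(covers(p, t) for p in implq_prmier_ess)]
-- ===== Notes on version B (the rewrite author's own statement) =====
-- stated objective: alternative
-- what changed: A destructively pops covered minterms from a working copy, rescanning from index 0 after every removal, and tests coverage by repeatedly popping '-' positions out of both strings; B is a single non-mutating filter over f using a closed-form coverage test (equal length and positionwise match with '-' as wildcard).
-- outside the precondition, e.g. on Arret(['0'], ['0', '--']): A returns [], B returns []
import Mathlib
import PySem

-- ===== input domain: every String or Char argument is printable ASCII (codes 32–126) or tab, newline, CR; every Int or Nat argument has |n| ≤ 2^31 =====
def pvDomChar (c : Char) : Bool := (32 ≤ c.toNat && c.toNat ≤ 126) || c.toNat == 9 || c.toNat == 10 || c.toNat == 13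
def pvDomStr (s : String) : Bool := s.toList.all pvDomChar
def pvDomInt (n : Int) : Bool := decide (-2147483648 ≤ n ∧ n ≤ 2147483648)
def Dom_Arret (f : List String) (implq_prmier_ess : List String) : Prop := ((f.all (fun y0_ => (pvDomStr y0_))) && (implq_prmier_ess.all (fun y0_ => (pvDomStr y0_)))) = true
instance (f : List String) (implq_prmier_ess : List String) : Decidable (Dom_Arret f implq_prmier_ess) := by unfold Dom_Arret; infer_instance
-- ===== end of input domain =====

-- B replaces A's destructive pop-and-rescan loops (and the pop-based coverage test) by a single
-- non-mutating filter with a closed-form positionwise coverage test (objective: alternative).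

-- ===== PORT A =====
-- module helper `contient`, ported step for step over List Char
-- (Python: pop first '-' from impliq and the same index from terme until no '-' remains, then compare).
-- Where Python's terme.pop(i) raises IndexError (i ≥ len(terme)) the port returns false; Pre_ excludes those inputs.
def contientLoop (impliq : List Char) (terme : List Char) : Bool :=
  match h : PySem.List.index? impliq '-' with
  | some i =>
      if hi : i < terme.length then
        contientLoop (impliq.eraseIdx i) (terme.eraseIdx i)   -- impliq.pop(i); terme.pop(i)
      else
        false   -- Python raises IndexError here (outside Pre_)
  | none => decide (impliq = terme)
termination_by impliq.length
decreasing_by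
  obtain ⟨hk, -, -⟩ := PySem.List.getElem_of_index?_eq_some h
  simp [List.length_eraseIdx, hk]
  omega

def contient (impliq : String) (terme : String) : Bool :=
  contientLoop impliq.toList terme.toList

-- inner while loop of A: scan with index i, pop covered term and reset i to 0
def ArretInner (premier : String) (xs : List String) (i : Nat) : List String :=
  if h : i < xs.length then
    if contient premier xs[i] then
      ArretInner premier (xs.eraseIdx i) 0      -- formules_minterme.pop(i); i = 0
    else
      ArretInner premier xs (i + 1)
  else xs
termination_by (xs.length, xs.length - i)
decreasing_by
  · left; simp [List.length_eraseIdx, h]; omega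
  · right; omega

def Arret (f : List String) (implq_prmier_ess : List String) : List String :=
  implq_prmier_ess.foldl (fun formules_minterme premier => ArretInner premier formules_minterme 0) f

-- ===== PORT B =====
-- closed-form coverage test of Source B: same length, and every determined position matches
def covers (p : String) (t : String) : Bool :=
  (p.toList.length == t.toList.length)
    && (p.toList.zip t.toList).all (fun ab => ab.1 == '-' || ab.1 == ab.2)

def Arret_alt (f : List String) (implq_prmier_ess : List String) : List String :=
  f.filter (fun t => !(implq_prmier_ess.any (fun p => covers p t)))

-- ===== PRECONDITION & SPEC =====
-- Pre_ excludes inputs where some prime implicant has a '-' at an index ≥ some minterm's length: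
-- on such a pair contient's terme.pop(i) raises IndexError. (Slightly narrower than A's exact raise
-- set: a minterm can be removed by an earlier prime before the dangerous pair is reached, and then
-- A still returns — e.g. (['0'], ['0','--']).)
def Pre_Arret (f : List String) (implq_prmier_ess : List String) : Prop :=
  ∀ p ∈ implq_prmier_ess, ∀ t ∈ f, '-' ∉ p.toList.drop t.toList.length
instance (f : List String) (implq_prmier_ess : List String) : Decidable (Pre_Arret f implq_prmier_ess) := by unfold Pre_Arret; infer_instance

def pvWitness_Arret : List String × List String := (["000", "010", "111"], ["0-0", "111"])

def Spec_Arret (f : List String) (implq_prmier_ess : List String) (out : List String) : Prop := out = Arret_alt f implq_prmier_ess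
instance (f : List String) (implq_prmier_ess : List String) (out : List String) : Decidable (Spec_Arret f implq_prmier_ess out) := by unfold Spec_Arret; infer_instance

-- ===== CLAIM (what is proved, stated in full; the proofs are below) =====
def Claim_equal_Arret : Prop := ∀ (f : List String) (implq_prmier_ess : List String), Dom_Arret f implq_prmier_ess → Pre_Arret f implq_prmier_ess → Spec_Arret f implq_prmier_ess (Arret f implq_prmier_ess)

-- ===== LEMMAS AND PROOFS =====

-- dropping past a simultaneously erased index
lemma drop_eraseIdx_high (p : List Char) (i n : Nat) (hip : i < p.length) (hin : i < n) :
    (p.eraseIdx i).drop (n - 1) = p.drop n := by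
  apply List.ext_getElem
  · simp [List.length_eraseIdx, hip]; omega
  · intro j h1 h2
    simp only [List.getElem_drop, List.getElem_eraseIdx]
    rw [dif_neg (by omega)]
    congr 1
    omega

-- zip commutes with simultaneous eraseIdx
lemma zip_eraseIdx (i : Nat) (p t : List Char) :
    (p.eraseIdx i).zip (t.eraseIdx i) = (p.zip t).eraseIdx i := by
  induction i generalizing p t with
  | zero => cases p <;> cases t <;> simp
  | succ n ih => cases p <;> cases t <;> simp [ih]

-- erasing an element on which the predicate holds does not change `all`
lemma all_eraseIdx_of_true {a : Type} (l : List a) (pr : a → Bool) (i : Nat)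
    (hi : i < l.length) (h : pr l[i] = true) : (l.eraseIdx i).all pr = l.all pr := by
  induction l generalizing i with
  | nil => simp
  | cons x xs ih =>
      cases i with
      | zero => simp_all
      | succ n =>
          simp only [List.eraseIdx_cons_succ, List.all_cons]
          rw [ih n (by simpa using hi) (by simpa using h)]

-- closed-form coverage over lists (= covers of Source B)
def coversL (p t : List Char) : Bool :=
  (p.length == t.length) && (p.zip t).all (fun ab => ab.1 == '-' || ab.1 == ab.2)

lemma coversL_cons (a b : Char) (ps ts : List Char) :
    coversL (a::ps) (b::ts) = ((a=='-' || a==b) && coversL ps ts) := by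
  simp [coversL, Bool.and_left_comm]

-- without '-', coversL is plain equality
lemma coversL_no_dash (p t : List Char) (hnd : '-' ∉ p) :
    coversL p t = decide (p = t) := by
  induction p generalizing t with
  | nil => cases t <;> simp [coversL]
  | cons a ps ih =>
      cases t with
      | nil => simp [coversL]
      | cons b ts =>
          have ha : (a == '-') = false :=
            beq_eq_false_iff_ne.mpr (fun h => hnd (by simp [h]))
          rw [coversL_cons, ih ts (fun h => hnd (by simp [h]))]
          by_cases hab : a = b
          · subst hab; simp
          · simp [hab, ha]

-- erasing a matching '-' position preserves coversL
lemma coversL_eraseIdx (p t : List Char) (i : Nat) (hip : i < p.length) (hit : i < t.length)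
    (hd : p[i] = '-') :
    coversL (p.eraseIdx i) (t.eraseIdx i) = coversL p t := by
  simp only [coversL, zip_eraseIdx]
  have hlen : ((p.length - 1 == t.length - 1) : Bool) = (p.length == t.length) := by
    by_cases h : p.length = t.length
    · simp [h]
    · have h2 : p.length - 1 ≠ t.length - 1 := by omega
      simp [h, h2]
  rw [List.length_eraseIdx, List.length_eraseIdx, if_pos hip, if_pos hit, hlen]
  have hiz : i < (p.zip t).length := by simp [List.length_zip]; omega
  rw [all_eraseIdx_of_true _ _ i hiz (by simp [hd])]

-- main helper equivalence: under Pre_'s pairwise condition the two coverage tests agree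
lemma contientLoop_eq_coversL (p t : List Char) (hpre : '-' ∉ p.drop t.length) :
    contientLoop p t = coversL p t := by
  induction p, t using contientLoop.induct with
  | case1 p t i h hi ih =>
      obtain ⟨hip, hd, -⟩ := PySem.List.getElem_of_index?_eq_some h
      rw [contientLoop, h]
      simp only [hi, dif_pos]
      have hpre' : '-' ∉ (p.eraseIdx i).drop ((t.eraseIdx i).length) := by
        rw [List.length_eraseIdx, if_pos hi, drop_eraseIdx_high p i t.length hip hi]
        exact hpre
      rw [ih hpre']
      exact coversL_eraseIdx p t i hip hi hd
  | case2 p t i h hi =>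
      obtain ⟨hip, hd, -⟩ := PySem.List.getElem_of_index?_eq_some h
      exfalso
      apply hpre
      have hlen : i - t.length < (p.drop t.length).length := by simp; omega
      have hmem : (p.drop t.length)[i - t.length]'hlen ∈ p.drop t.length := List.getElem_mem hlen
      rw [List.getElem_drop] at hmem
      simp only [show t.length + (i - t.length) = i from by omega] at hmem
      rwa [hd] at hmem
  | case3 p t h =>
      rw [contientLoop, h]
      rw [coversL_no_dash p t ((PySem.List.index?_eq_none_iff p '-').mp h)]

lemma contient_eq_covers (p t : String) (hpre : '-' ∉ p.toList.drop t.toList.length) :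
    contient p t = covers p t := by
  rw [contient, covers, ← coversL]
  exact contientLoop_eq_coversL _ _ hpre

-- the inner scan-with-reset computes a filter, provided the prefix already scanned is uncovered
lemma ArretInner_eq_filter (p : String) (xs : List String) (i : Nat)
    (hpre : ∀ j (hj : j < i) (hj' : j < xs.length), contient p xs[j] = false) :
    ArretInner p xs i = xs.filter (fun t => !contient p t) := by
  induction xs, i using ArretInner.induct p with
  | case1 xs i h hc ih =>
      rw [ArretInner, dif_pos h, if_pos hc, ih (by simp)]
      rw [List.eraseIdx_eq_take_drop_succ, List.filter_append]
      conv_rhs => rw [← List.take_append_drop i xs, List.drop_eq_getElem_cons h]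
      rw [List.filter_append, List.filter_cons_of_neg (by simp [hc])]
  | case2 xs i h hc ih =>
      rw [ArretInner, dif_pos h, if_neg hc]
      refine ih ?_
      intro j hj hj'
      rcases Nat.lt_or_ge j i with hji | hji
      · exact hpre j hji hj'
      · have : j = i := by omega
        subst this
        simpa using hc
  | case3 xs i h =>
      rw [ArretInner, dif_neg h]
      have : ∀ t ∈ xs, contient p t = false := by
        intro t ht
        obtain ⟨j, hj, rfl⟩ := List.mem_iff_getElem.mp ht
        exact hpre j (by omega) hj
      rw [List.filter_eq_self.mpr]
      intro a ha
      simp [this a ha]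

lemma foldl_inner_eq_filter (primes : List String) (xs : List String) :
    primes.foldl (fun acc p => ArretInner p acc 0) xs
      = xs.filter (fun t => !(primes.any (fun p => contient p t))) := by
  induction primes generalizing xs with
  | nil => simp
  | cons p ps ih =>
      simp only [List.foldl_cons]
      rw [ArretInner_eq_filter p xs 0 (by omega)]
      rw [ih, List.filter_filter]
      congr 1
      funext t
      simp [List.any_cons, Bool.and_comm]

-- pointwise: under Pre_'s condition, `any contient` = `any covers`
lemma any_contient_eq_any_covers (primes : List String) (t : String)
    (h : ∀ p ∈ primes, '-' ∉ p.toList.drop t.toList.length) :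
    primes.any (fun p => contient p t) = primes.any (fun p => covers p t) := by
  induction primes with
  | nil => rfl
  | cons p ps ih =>
      simp only [List.any_cons]
      rw [contient_eq_covers p t (h p (by simp)), ih (fun q hq => h q (by simp [hq]))]

-- ===== VERDICT (by name: the statement is the Claim_ definition above) =====
theorem Arret_spec : Claim_equal_Arret := by
  intro f primes _ hpre
  unfold Spec_Arret Arret Arret_alt
  rw [foldl_inner_eq_filter primes f]
  apply List.filter_congr
  intro t ht
  rw [any_contient_eq_any_covers primes t (fun p hp => hpre p hp t ht)]
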